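-- pv_equiv track=rewrite | github.com/TOHgoto/cuhk-timetable-exporter | cuhk_timetable_export/teaching_html.py | _normalize_day
-- ===== SOURCE A (Python) =====
-- def _normalize_day(text: str) -> str | None:
--     """
--     Normalize day of week text (e.g. 'Mon', 'MON', 'Monday') to 3-letter English.
--     """
--     t = text.strip().lower()
--     mapping = {
--         "mo": "Mon",
--         "mon": "Mon",
--         "monday": "Mon",
--         "tu": "Tue",
--         "tue": "Tue",
--         "tues": "Tue",
--         "tuesday": "Tue",
--         "we": "Wed",
--         "wed": "Wed",
--         "weds": "Wed",
--         "wednesday": "Wed",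
--         "th": "Thu",
--         "thu": "Thu",
--         "thur": "Thu",
--         "thurs": "Thu",
--         "thursday": "Thu",
--         "fr": "Fri",
--         "fri": "Fri",
--         "friday": "Fri",
--         "sa": "Sat",
--         "sat": "Sat",
--         "saturday": "Sat",
--         "su": "Sun",
--         "sun": "Sun",
--         "sunday": "Sun",
--     }
--     for key, val in mapping.items():
--         if t.startswith(key):
--             return val
--     return None
-- ===== SOURCE B (Python) =====
-- _PREFIX = {
--     "mo": "Mon",
--     "tu": "Tue",
--     "we": "Wed",
--     "th": "Thu",
--     "fr": "Fri",
--     "sa": "Sat",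
--     "su": "Sun",
-- }
--
--
-- def _normalize_day(text: str) -> str | None:
--     # Every key of A's table shares its first two letters with exactly one
--     # day, so the whole prefix scan collapses to one lookup on t[:2].
--     t = text.strip().lower()
--     return _PREFIX.get(t[:2])
-- ===== Notes on version B (the rewrite author's own statement) =====
-- stated objective: simpler
-- what changed: Replaced the 25-key startswith scan with a single dict lookup on the first two characters of the stripped, lowercased input, since every key in A's table is determined by its unique two-letter prefix.
import Mathlib
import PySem

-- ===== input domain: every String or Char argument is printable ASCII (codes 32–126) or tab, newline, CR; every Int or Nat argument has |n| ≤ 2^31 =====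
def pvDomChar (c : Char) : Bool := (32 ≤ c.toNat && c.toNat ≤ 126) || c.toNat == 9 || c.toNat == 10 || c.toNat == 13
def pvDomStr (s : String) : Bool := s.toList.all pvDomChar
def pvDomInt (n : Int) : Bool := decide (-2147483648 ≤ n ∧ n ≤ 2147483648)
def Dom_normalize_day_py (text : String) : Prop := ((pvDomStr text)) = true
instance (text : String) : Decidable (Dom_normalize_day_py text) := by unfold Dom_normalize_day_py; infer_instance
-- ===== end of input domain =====

-- B replaces A's 25-key startswith scan with one dict lookup on the first two
-- characters of the stripped, lowercased input (every key of A's table is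
-- determined by its unique two-letter prefix); objective: simpler.

-- ===== PORT A =====
-- A's dict literal, in insertion order (iterated as key/value pairs).
def mappingA : List (String × String) :=
  [("mo","Mon"),("mon","Mon"),("monday","Mon"),
   ("tu","Tue"),("tue","Tue"),("tues","Tue"),("tuesday","Tue"),
   ("we","Wed"),("wed","Wed"),("weds","Wed"),("wednesday","Wed"),
   ("th","Thu"),("thu","Thu"),("thur","Thu"),("thurs","Thu"),("thursday","Thu"),
   ("fr","Fri"),("fri","Fri"),("friday","Fri"),
   ("sa","Sat"),("sat","Sat"),("saturday","Sat"),
   ("su","Sun"),("sun","Sun"),("sunday","Sun")]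

-- A's 'for key, val in mapping.items(): if t.startswith(key): return val' loop.
def loopA (t : String) : List (String × String) → Option String
  | [] => none
  | (k, v) :: rest => if PySem.Str.startswith t k then some v else loopA t rest

def normalize_day_py (text : String) : Option String :=
  let t := PySem.Str.lower (PySem.Str.strip text)
  loopA t mappingA

-- ===== PORT B =====
-- B's module-level _PREFIX dict.
def prefixMap : PySem.Dict String String :=
  PySem.Dict.ofList
    [("mo","Mon"),("tu","Tue"),("we","Wed"),("th","Thu"),("fr","Fri"),("sa","Sat"),("su","Sun")]

def normalize_day_py_alt (text : String) : Option String :=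
  let t := PySem.Str.lower (PySem.Str.strip text)
  prefixMap.get? (PySem.Str.slice t none (some 2))

-- ===== PRECONDITION & SPEC =====
def Spec_normalize_day_py (text : String) (out : Option String) : Prop := out = normalize_day_py_alt text
instance (text : String) (out : Option String) : Decidable (Spec_normalize_day_py text out) := by unfold Spec_normalize_day_py; infer_instance

-- ===== CLAIM (what is proved, stated in full; the proofs are below) =====
def Claim_equal_normalize_day_py : Prop := ∀ (text : String), Dom_normalize_day_py text → Spec_normalize_day_py text (normalize_day_py text)

-- ===== LEMMAS AND PROOFS =====

-- String `==` is `==` of the code-point lists.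
theorem beq_eq_beq_toList (a b : String) : (a == b) = (a.toList == b.toList) := by
  rcases Bool.eq_false_or_eq_true (a == b) with h | h <;>
    rcases Bool.eq_false_or_eq_true (a.toList == b.toList) with h2 | h2 <;>
    simp_all [String.toList_inj]

-- B's dict literal has pairwise-distinct keys, so ofList keeps it as written.
theorem prefixMap_eq : prefixMap = PySem.Dict.mk
    [("mo","Mon"),("tu","Tue"),("we","Wed"),("th","Thu"),("fr","Fri"),("sa","Sat"),("su","Sun")] := by
  decide

-- Core fact: A's prefix scan over the 25 keys equals B's lookup of s[:2],
-- because every key of mappingA extends its unique two-letter prefix and the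
-- two-letter key of each group comes first in A's iteration order.
set_option maxHeartbeats 2000000 in
theorem loopA_eq_prefix_lookup (s : String) :
    loopA s mappingA = prefixMap.get? (PySem.Str.slice s none (some 2)) := by
  rw [prefixMap_eq]
  simp only [mappingA, loopA,
    PySem.Str.startswith_eq, PySem.Chars.startswith_iff, beq_eq_beq_toList, PySem.Str.toList_slice,
    PySem.Chars.slice_eq_listSlice, PySem.Dict.get?]
  have h2 : PySem.List.slice s.toList none (some 2) = s.toList.take 2 := by
    rw [show (2:Int) = ((2:Nat):Int) by norm_num, PySem.List.slice_to_natCast]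
  rw [h2]
  generalize s.toList = cs
  match cs with
  | [] => simp
  | [c] => simp [List.cons_prefix_cons]
  | c1 :: c2 :: r =>
    simp only [List.cons_prefix_cons, List.take_succ_cons, List.take_zero, List.nil_prefix,
      and_true,
      show ("mo".toList = ['m','o']) from by decide, show ("mon".toList = ['m','o','n']) from by decide,
      show ("monday".toList = ['m','o','n','d','a','y']) from by decide,
      show ("tu".toList = ['t','u']) from by decide, show ("tue".toList = ['t','u','e']) from by decide,
      show ("tues".toList = ['t','u','e','s']) from by decide,
      show ("tuesday".toList = ['t','u','e','s','d','a','y']) from by decide,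
      show ("we".toList = ['w','e']) from by decide, show ("wed".toList = ['w','e','d']) from by decide,
      show ("weds".toList = ['w','e','d','s']) from by decide,
      show ("wednesday".toList = ['w','e','d','n','e','s','d','a','y']) from by decide,
      show ("th".toList = ['t','h']) from by decide, show ("thu".toList = ['t','h','u']) from by decide,
      show ("thur".toList = ['t','h','u','r']) from by decide,
      show ("thurs".toList = ['t','h','u','r','s']) from by decide,
      show ("thursday".toList = ['t','h','u','r','s','d','a','y']) from by decide,
      show ("fr".toList = ['f','r']) from by decide, show ("fri".toList = ['f','r','i']) from by decide,
      show ("friday".toList = ['f','r','i','d','a','y']) from by decide,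
      show ("sa".toList = ['s','a']) from by decide, show ("sat".toList = ['s','a','t']) from by decide,
      show ("saturday".toList = ['s','a','t','u','r','d','a','y']) from by decide,
      show ("su".toList = ['s','u']) from by decide, show ("sun".toList = ['s','u','n']) from by decide,
      show ("sunday".toList = ['s','u','n','d','a','y']) from by decide]
    by_cases h1 : 'm' = c1
    · by_cases h2 : 'o' = c2
      · simp [← h1, ← h2]
      · simp [← h1, h2]
    · by_cases h3 : 't' = c1
      · by_cases h4 : 'u' = c2
        · simp [← h3, ← h4]
        · by_cases h5 : 'h' = c2
          · simp [← h3, ← h5]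
          · simp [← h3, h4, h5]
      · by_cases h6 : 'w' = c1
        · by_cases h7 : 'e' = c2
          · simp [← h6, ← h7]
          · simp [← h6, h7]
        · by_cases h8 : 'f' = c1
          · by_cases h9 : 'r' = c2
            · simp [← h8, ← h9]
            · simp [← h8, h9]
          · by_cases h10 : 's' = c1
            · by_cases h11 : 'a' = c2
              · simp [← h10, ← h11]
              · by_cases h12 : 'u' = c2
                · simp [← h10, ← h12]
                · simp [← h10, h11, h12]
            · simp [h1, h3, h6, h8, h10]

-- ===== VERDICT (by name: the statement is the Claim_ definition above) =====
theorem normalize_day_py_spec : Claim_equal_normalize_day_py := by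
  intro text _
  unfold Spec_normalize_day_py normalize_day_py normalize_day_py_alt
  exact loopA_eq_prefix_lookup _
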